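-- pv_equiv track=rewrite | github.com/iveL91/Advent-of-Code-2020 | 21/main.py | determine_none_allergens
-- ===== SOURCE A (Python) =====
-- def determine_none_allergens(foods: list[tuple[list[str], list[str]]], all_ingredients: set[str], all_allergens: set[str]) -> set[str]:
--     none_allergens: set[str] = set()
--     for ingredient in all_ingredients:
--         for allergen in all_allergens:
--             for food in foods:
--                 if allergen in food[1] and ingredient not in food[0]:
--                     break
--             else:
--                 break
--         else:
--             none_allergens.add(ingredient)
--     return none_allergens
-- ===== SOURCE B (Python) =====
-- def determine_none_allergens(foods: list[tuple[list[str], list[str]]], all_ingredients: set[str], all_allergens: set[str]) -> set[str]: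
--     # Per allergen, intersect the ingredient lists of the foods listing it;
--     # an ingredient can be no allergen iff it is in no allergen's candidate set.
--     listed: set[str] = set()
--     for _, allergens in foods:
--         listed.update(allergens)
--     if any(a not in listed for a in all_allergens):
--         # an allergen listed in no food could be any ingredient: none is safe
--         return set()
--     bad: set[str] = set()
--     for allergen in all_allergens:
--         cand = None
--         for ingredients, allergens in foods:
--             if allergen in allergens:
--                 cand = set(ingredients) if cand is None else cand.intersection(ingredients)
--         bad |= cand
--     return {i for i in all_ingredients if i not in bad}
-- ===== Notes on version B (the rewrite author's own statement) =====
-- stated objective: faster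
-- what changed: Replaces A's triple nested loop (for every ingredient and allergen, rescan all foods) by one pass per allergen that intersects the ingredient lists of the foods listing it, unions these candidate sets, and subtracts the union from all_ingredients.
import Mathlib
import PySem

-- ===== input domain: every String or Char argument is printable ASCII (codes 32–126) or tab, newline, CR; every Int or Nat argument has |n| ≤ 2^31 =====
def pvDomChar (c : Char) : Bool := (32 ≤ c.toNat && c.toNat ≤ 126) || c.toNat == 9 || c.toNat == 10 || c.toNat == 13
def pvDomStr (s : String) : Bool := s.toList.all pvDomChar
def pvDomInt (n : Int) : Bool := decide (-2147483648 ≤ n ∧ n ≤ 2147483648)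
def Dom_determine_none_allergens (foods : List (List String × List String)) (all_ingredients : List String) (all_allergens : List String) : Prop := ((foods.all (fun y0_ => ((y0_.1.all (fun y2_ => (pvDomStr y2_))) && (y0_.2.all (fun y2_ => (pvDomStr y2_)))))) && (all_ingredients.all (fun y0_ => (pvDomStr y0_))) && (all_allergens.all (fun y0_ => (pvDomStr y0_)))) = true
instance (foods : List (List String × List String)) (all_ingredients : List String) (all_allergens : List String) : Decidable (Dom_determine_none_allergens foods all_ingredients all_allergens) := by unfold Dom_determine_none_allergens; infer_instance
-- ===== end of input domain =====

-- B replaces A's triple nested loop (per ingredient × allergen, rescan all foods) by one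
-- per-allergen intersection of ingredient lists, a union of those candidate sets, and one
-- final subtraction — an asymptotically faster algorithm with the same result (as a set).

-- ===== PORT A =====
-- inner 'for food in foods' loop; true = the loop BROKE (some food lists the allergen
-- but not the ingredient), false = it completed (so the 'else: break' fires).
def aFoodLoop (ingredient allergen : String) : List (List String × List String) → Bool
  | [] => false
  | f :: rest => if allergen ∈ f.2 ∧ ingredient ∉ f.1 then true else aFoodLoop ingredient allergen rest

-- middle 'for allergen in all_allergens' loop; true = it COMPLETED (its 'else' adds the ingredient).
def aAllergenLoop (ingredient : String) (foods : List (List String × List String)) : List String → Bool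
  | [] => true
  | a :: rest => if aFoodLoop ingredient a foods then aAllergenLoop ingredient foods rest else false

def determine_none_allergens (foods : List (List String × List String)) (all_ingredients : List String) (all_allergens : List String) : List String :=
  all_ingredients.foldl
    (fun s i => if aAllergenLoop i foods all_allergens then PySem.Set.add s i else s)
    PySem.Set.empty

-- ===== PORT B =====
-- the inner 'for ingredients, allergens in foods' loop body of Source B (cand as Option)
def bCandStep (allergen : String) (cand : Option (PySem.Set String)) (f : List String × List String) : Option (PySem.Set String) :=
  if allergen ∈ f.2 then
    some (match cand with
          | none => PySem.Set.ofList f.1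
          | some c => PySem.Set.inter c f.1)
  else cand

def determine_none_allergens_alt (foods : List (List String × List String)) (all_ingredients : List String) (all_allergens : List String) : List String :=
  let listed := foods.foldl (fun s f => PySem.Set.update s f.2) PySem.Set.empty
  if all_allergens.any (fun a => !(PySem.Set.contains listed a)) then []
  else
    let bad := all_allergens.foldl
      (fun bad a => PySem.Set.union bad ((foods.foldl (bCandStep a) none).getD PySem.Set.empty))
      PySem.Set.empty
    PySem.Set.ofList (all_ingredients.filter (fun i => !(PySem.Set.contains bad i)))

-- ===== PRECONDITION & SPEC =====
def Spec_determine_none_allergens (foods : List (List String × List String)) (all_ingredients : List String) (all_allergens : List String) (out : List String) : Prop := out = determine_none_allergens_alt foods all_ingredients all_allergens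
instance (foods : List (List String × List String)) (all_ingredients : List String) (all_allergens : List String) (out : List String) : Decidable (Spec_determine_none_allergens foods all_ingredients all_allergens out) := by unfold Spec_determine_none_allergens; infer_instance

-- ===== CLAIM (what is proved, stated in full; the proofs are below) =====
def Claim_equal_determine_none_allergens : Prop := ∀ (foods : List (List String × List String)) (all_ingredients : List String) (all_allergens : List String), Dom_determine_none_allergens foods all_ingredients all_allergens → Spec_determine_none_allergens foods all_ingredients all_allergens (determine_none_allergens foods all_ingredients all_allergens)

-- ===== LEMMAS AND PROOFS =====

-- A's accumulation loop is 'Set.ofList of the kept ingredients'.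
theorem foldl_add_if (p : String → Bool) (l : List String) (s : PySem.Set String) :
    l.foldl (fun s i => if p i then PySem.Set.add s i else s) s
      = (l.filter p).foldl PySem.Set.add s := by
  induction l generalizing s with
  | nil => rfl
  | cons x xs ih =>
    by_cases h : p x <;> simp [h, ih]

theorem aFoodLoop_iff (i a : String) (foods : List (List String × List String)) :
    aFoodLoop i a foods = true ↔ ∃ f ∈ foods, a ∈ f.2 ∧ i ∉ f.1 := by
  induction foods with
  | nil => simp [aFoodLoop]
  | cons f rest ih =>
    by_cases h : a ∈ f.2 ∧ i ∉ f.1 <;> simp [aFoodLoop, h, ih]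

theorem aAllergenLoop_iff (i : String) (foods : List (List String × List String)) (allergens : List String) :
    aAllergenLoop i foods allergens = true ↔ ∀ a ∈ allergens, aFoodLoop i a foods = true := by
  induction allergens with
  | nil => simp [aAllergenLoop]
  | cons a rest ih =>
    by_cases h : aFoodLoop i a foods <;> simp [aAllergenLoop, h, ih]

-- membership in B's candidate fold once the accumulator is 'some c'
theorem mem_candFold_some (a i : String) (foods : List (List String × List String))
    (c : PySem.Set String) (d : PySem.Set String) :
    i ∈ (foods.foldl (bCandStep a) (some c)).getD d
      ↔ i ∈ c ∧ ∀ f ∈ foods, a ∈ f.2 → i ∈ f.1 := by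
  induction foods generalizing c with
  | nil => simp
  | cons f rest ih =>
    by_cases h : a ∈ f.2
    · simp [List.foldl_cons, bCandStep, h, ih, PySem.Set.mem_inter]
      tauto
    · simp [List.foldl_cons, bCandStep, h, ih]

-- membership in B's candidate set (empty when no food lists the allergen)
theorem mem_candFold (a i : String) (foods : List (List String × List String)) :
    i ∈ (foods.foldl (bCandStep a) none).getD PySem.Set.empty
      ↔ (∃ f ∈ foods, a ∈ f.2) ∧ ∀ f ∈ foods, a ∈ f.2 → i ∈ f.1 := by
  induction foods with
  | nil => simp [PySem.Set.empty]
  | cons f rest ih =>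
    by_cases h : a ∈ f.2
    · simp only [List.foldl_cons, bCandStep, if_pos h, mem_candFold_some,
        PySem.Set.mem_ofList, List.forall_mem_cons, List.exists_mem_cons_iff]
      tauto
    · simp only [List.foldl_cons, bCandStep, if_neg h, ih, List.forall_mem_cons,
        List.exists_mem_cons_iff]
      simp [h]

-- membership in B's union-of-candidates loop
theorem mem_badFold (i : String) (cand : String → PySem.Set String)
    (allergens : List String) (s : PySem.Set String) :
    i ∈ allergens.foldl (fun bad a => PySem.Set.union bad (cand a)) s
      ↔ i ∈ s ∨ ∃ a ∈ allergens, i ∈ cand a := by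
  induction allergens generalizing s with
  | nil => simp
  | cons a rest ih =>
    simp [List.foldl_cons, ih, PySem.Set.mem_union]
    tauto

-- membership in B's 'listed' set
theorem mem_listedFold (a : String) (foods : List (List String × List String))
    (s : PySem.Set String) :
    a ∈ foods.foldl (fun s f => PySem.Set.update s f.2) s
      ↔ a ∈ s ∨ ∃ f ∈ foods, a ∈ f.2 := by
  induction foods generalizing s with
  | nil => simp
  | cons f rest ih =>
    simp [List.foldl_cons, ih, PySem.Set.mem_update]
    tauto

theorem determine_none_allergens_spec' (foods : List (List String × List String))
    (all_ingredients : List String) (all_allergens : List String) :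
    determine_none_allergens foods all_ingredients all_allergens
      = determine_none_allergens_alt foods all_ingredients all_allergens := by
  unfold determine_none_allergens determine_none_allergens_alt
  simp only []
  rw [foldl_add_if]
  by_cases hmiss : all_allergens.any
      (fun a => !(PySem.Set.contains
        (foods.foldl (fun s f => PySem.Set.update s f.2) PySem.Set.empty) a))
  · -- some allergen is listed in no food: A keeps no ingredient either
    rw [if_pos hmiss]
    rcases List.any_eq_true.mp hmiss with ⟨a, ha, hnl⟩
    simp only [Bool.not_eq_eq_eq_not, Bool.not_true] at hnl
    have hnofood : ∀ f ∈ foods, a ∉ f.2 := by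
      intro f hf hfa
      have : a ∈ foods.foldl (fun s f => PySem.Set.update s f.2) PySem.Set.empty :=
        (mem_listedFold a foods PySem.Set.empty).mpr (Or.inr ⟨f, hf, hfa⟩)
      rw [← PySem.Set.contains_iff] at this
      rw [this] at hnl
      exact Bool.noConfusion hnl
    have hfilter : all_ingredients.filter (fun i => aAllergenLoop i foods all_allergens) = [] := by
      apply List.filter_eq_nil_iff.mpr
      intro i _
      simp only [Bool.not_eq_true]
      by_contra hk
      rw [Bool.not_eq_false, aAllergenLoop_iff] at hk
      rcases (aFoodLoop_iff i a foods).mp (hk a ha) with ⟨f, hf, hfa, _⟩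
      exact hnofood f hf hfa
    rw [hfilter]
    rfl
  · -- every allergen is listed in some food
    rw [if_neg hmiss]
    have hlisted : ∀ a ∈ all_allergens, ∃ f ∈ foods, a ∈ f.2 := by
      intro a ha
      by_contra hno
      apply hmiss
      apply List.any_eq_true.mpr
      refine ⟨a, ha, ?_⟩
      simp only [Bool.not_eq_eq_eq_not, Bool.not_true]
      by_contra hc
      have hct : PySem.Set.contains (foods.foldl (fun s f => PySem.Set.update s f.2) PySem.Set.empty) a = true := by
        revert hc; cases (PySem.Set.contains (foods.foldl (fun s f => PySem.Set.update s f.2) PySem.Set.empty) a) <;> simp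
      have := (PySem.Set.contains_iff _ _).mp hct
      rcases (mem_listedFold a foods PySem.Set.empty).mp this with h' | h'
      · simp [PySem.Set.empty] at h'
      · exact hno h'
    show (List.filter _ all_ingredients).foldl PySem.Set.add [] = _
    rw [← PySem.Set.ofList_eq_foldl]
    congr 1
    apply List.filter_congr
    intro i hi
    have hbad := mem_badFold i
      (fun a => (foods.foldl (bCandStep a) none).getD PySem.Set.empty)
      all_allergens PySem.Set.empty
    rw [← PySem.Set.contains_iff] at hbad
    simp only [PySem.Set.empty, List.not_mem_nil, false_or] at hbad
    rw [Bool.eq_iff_iff, Bool.not_eq_true', aAllergenLoop_iff]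
    simp only [PySem.Set.empty]
    constructor
    · intro h
      by_contra hc
      rw [Bool.not_eq_false] at hc
      rcases hbad.mp hc with ⟨a, ha, hmem⟩
      have hall := ((mem_candFold a i foods).mp (by simpa [PySem.Set.empty] using hmem)).2
      rcases (aFoodLoop_iff i a foods).mp (h a ha) with ⟨f, hf, hfa, hfi⟩
      exact hfi (hall f hf hfa)
    · intro h a ha
      rw [aFoodLoop_iff]
      by_contra hno
      push Not at hno
      have hm : i ∈ (foods.foldl (bCandStep a) none).getD PySem.Set.empty := by
        rw [mem_candFold a i foods]
        exact ⟨hlisted a ha, hno⟩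
      have := hbad.mpr ⟨a, ha, by simpa [PySem.Set.empty] using hm⟩
      rw [h] at this
      exact Bool.false_ne_true this

-- ===== VERDICT (by name: the statement is the Claim_ definition above) =====
theorem determine_none_allergens_spec : Claim_equal_determine_none_allergens := by
  intro foods all_ingredients all_allergens _
  exact determine_none_allergens_spec' foods all_ingredients all_allergens
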